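-- pv_equiv track=rewrite | github.com/SashkaGus/Stepik_QA_course | PycharmProjects/codewars_tasks/remove_all_after.py | remove_all_after
-- ===== SOURCE A (Python) =====
-- from typing import Iterable
--
-- def remove_all_after(items: list, border: int) -> Iterable:
--     fin_list = []
--     if items:
--         for i in items:
--             if i != border:
--                 fin_list.append(i)
--             else:
--                 fin_list.append(i)
--                 break
--     else:
--         fin_list = []
--     return fin_list;
-- ===== SOURCE B (Python) =====
-- def remove_all_after(items: list, border: int):
--     try:
--         return items[:items.index(border) + 1]
--     except ValueError:
--         return list(items)
-- ===== Notes on version B (the rewrite author's own statement) =====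
-- stated objective: idiomatic
-- what changed: Replaces the explicit append-and-break accumulation loop with a find-then-slice: items.index(border) locates the first occurrence and one bulk slice items[:idx+1] is returned, with a ValueError fallback copying the whole list.
import Mathlib
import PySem

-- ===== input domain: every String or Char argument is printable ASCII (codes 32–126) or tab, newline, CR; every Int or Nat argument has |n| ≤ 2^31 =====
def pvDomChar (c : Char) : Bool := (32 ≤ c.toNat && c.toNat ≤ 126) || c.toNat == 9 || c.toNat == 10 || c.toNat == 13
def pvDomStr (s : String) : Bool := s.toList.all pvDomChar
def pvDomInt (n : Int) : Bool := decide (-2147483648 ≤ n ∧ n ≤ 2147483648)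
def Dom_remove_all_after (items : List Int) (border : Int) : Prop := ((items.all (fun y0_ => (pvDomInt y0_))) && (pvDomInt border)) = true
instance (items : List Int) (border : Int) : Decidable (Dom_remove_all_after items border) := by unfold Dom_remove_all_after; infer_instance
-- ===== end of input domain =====

-- ===== PORT A =====
-- loop: the for-loop with break, carrying the accumulator fin_list
def removeAllAfterLoop (border : Int) : List Int → List Int → List Int
  | [], acc => acc
  | i :: rest, acc =>
    if i ≠ border then removeAllAfterLoop border rest (acc ++ [i])
    else acc ++ [i]

def remove_all_after (items : List Int) (border : Int) : List Int :=
  if items = [] then [] else removeAllAfterLoop border items []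

-- ===== PORT B =====
-- idiomatic B: one line in Source B because try/except + index + slice; the index search then a bulk slice
def remove_all_after_alt (items : List Int) (border : Int) : List Int :=
  match PySem.List.index? items border with
  | some idx => PySem.List.slice items none (some ((idx : Int) + 1))
  | none => items

-- ===== PRECONDITION & SPEC =====
def Spec_remove_all_after (items : List Int) (border : Int) (out : List Int) : Prop := out = remove_all_after_alt items border
instance (items : List Int) (border : Int) (out : List Int) : Decidable (Spec_remove_all_after items border out) := by unfold Spec_remove_all_after; infer_instance

-- ===== CLAIM (what is proved, stated in full; the proofs are below) =====
def Claim_equal_remove_all_after : Prop := ∀ (items : List Int) (border : Int), Dom_remove_all_after items border → Spec_remove_all_after items border (remove_all_after items border)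

-- ===== LEMMAS AND PROOFS =====

lemma loop_eq_alt (border : Int) (items acc : List Int) :
    removeAllAfterLoop border items acc = acc ++ remove_all_after_alt items border := by
  induction items generalizing acc with
  | nil => simp [removeAllAfterLoop, remove_all_after_alt, PySem.List.index?]
  | cons x xs ih =>
    by_cases hx : x = border
    · subst hx
      unfold remove_all_after_alt
      rw [PySem.List.index?_cons_self]
      simp only []
      rw [show ((0 : Nat) : Int) + 1 = ((1 : Nat) : Int) by norm_num,
          PySem.List.slice_to_natCast]
      simp [removeAllAfterLoop]
    · rw [removeAllAfterLoop, if_pos hx, ih]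
      unfold remove_all_after_alt
      rw [PySem.List.index?_cons_of_ne xs hx]
      cases h : PySem.List.index? xs border with
      | none => simp
      | some k =>
        simp only [Option.map_some]
        rw [show ((k + 1 : Nat) : Int) + 1 = (((k + 2 : Nat)) : Int) by push_cast; ring,
            show ((k : Nat) : Int) + 1 = (((k + 1 : Nat)) : Int) by push_cast; ring,
            PySem.List.slice_to_natCast, PySem.List.slice_to_natCast]
        simp [List.append_assoc]

-- ===== VERDICT (by name: the statement is the Claim_ definition above) =====
theorem remove_all_after_spec : Claim_equal_remove_all_after := by
  intro items border _
  unfold Spec_remove_all_after remove_all_after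
  by_cases h : items = []
  · subst h; simp [remove_all_after_alt, PySem.List.index?]
  · rw [if_neg h, loop_eq_alt]; simp
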